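-- pv_equiv track=rewrite | github.com/Roni95/Graphics | midpoint circle drawing algorithm.py | draw_circle_midpoint
-- ===== SOURCE A (Python) =====
-- def draw_circle_midpoint(x_center, y_center, radius):
--     x_points, y_points = [], []
--
--     x = radius
--     y = 0
--     p = 1 - radius
--
--     while x >= y:
--         x_points.append(x + x_center)
--         y_points.append(y + y_center)
--         x_points.append(y + x_center)
--         y_points.append(x + y_center)
--         x_points.append(-x + x_center)
--         y_points.append(y + y_center)
--         x_points.append(-y + x_center)
--         y_points.append(x + y_center)
--         x_points.append(-x + x_center)
--         y_points.append(-y + y_center)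
--         x_points.append(-y + x_center)
--         y_points.append(-x + y_center)
--         x_points.append(x + x_center)
--         y_points.append(-y + y_center)
--         x_points.append(y + x_center)
--         y_points.append(-x + y_center)
--
--         y += 1
--
--         if p <= 0:
--             p = p + 2 * y + 1
--         else:
--             x -= 1
--             p = p + 2 * y - 2 * x + 1
--
--     return x_points, y_points
-- ===== SOURCE B (Python) =====
-- # Two-phase rewrite: collect the octant arc first, then emit the 8 symmetric
-- # reflections per arc point in a separate transform-table pass.
-- _TRANSFORMS = ((1, 1, False), (1, 1, True), (-1, 1, False), (-1, 1, True),
--                (-1, -1, False), (-1, -1, True), (1, -1, False), (1, -1, True))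
--
-- def draw_circle_midpoint(x_center, y_center, radius):
--     arc = []
--     x, y, p = radius, 0, 1 - radius
--     while x >= y:
--         arc.append((x, y))
--         y += 1
--         if p <= 0:
--             p = p + 2 * y + 1
--         else:
--             x -= 1
--             p = p + 2 * y - 2 * x + 1
--     x_points, y_points = [], []
--     for ax, ay in arc:
--         for sx, sy, swap in _TRANSFORMS:
--             a, b = (ay, ax) if swap else (ax, ay)
--             x_points.append(sx * a + x_center)
--             y_points.append(sy * b + y_center)
--     return x_points, y_points
-- ===== Notes on version B (the rewrite author's own statement) =====
-- stated objective: alternative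
-- what changed: B splits A's single interleaved loop into two passes: it first materialises the octant arc points, then a separate pass emits the 8 reflections of each arc point driven by an explicit (sign_x, sign_y, swap) transform table.
import Mathlib
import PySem

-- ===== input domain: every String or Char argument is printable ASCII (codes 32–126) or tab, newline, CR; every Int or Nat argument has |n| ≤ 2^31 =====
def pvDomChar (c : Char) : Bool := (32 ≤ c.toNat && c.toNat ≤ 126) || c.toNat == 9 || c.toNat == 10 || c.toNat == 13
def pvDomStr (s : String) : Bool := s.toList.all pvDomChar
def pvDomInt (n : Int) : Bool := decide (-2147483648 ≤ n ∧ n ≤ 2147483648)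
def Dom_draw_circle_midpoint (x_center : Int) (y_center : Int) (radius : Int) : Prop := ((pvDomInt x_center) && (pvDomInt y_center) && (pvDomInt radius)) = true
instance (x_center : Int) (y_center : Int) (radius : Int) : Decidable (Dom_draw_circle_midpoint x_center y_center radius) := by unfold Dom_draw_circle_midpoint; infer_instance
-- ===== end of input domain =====

-- B is an alternative decomposition: it materialises the octant arc first and emits the
-- 8 symmetric reflections per arc point in a separate transform-table pass (same cost).

-- ===== PORT A =====
-- A's while loop: appends 8 reflected points each iteration, then updates y, p, x.
def pvLoopA (xc yc x y p : Int) : List Int × List Int :=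
  if x ≥ y then
    let y' := y + 1
    let x' := if p ≤ 0 then x else x - 1
    let p' := if p ≤ 0 then p + 2 * y' + 1 else p + 2 * y' - 2 * (x - 1) + 1
    let res := pvLoopA xc yc x' y' p'
    ([x + xc, y + xc, -x + xc, -y + xc, -x + xc, -y + xc, x + xc, y + xc] ++ res.1,
     [y + yc, x + yc, y + yc, x + yc, -y + yc, -x + yc, -y + yc, -x + yc] ++ res.2)
  else ([], [])
termination_by (x - y + 1).toNat
decreasing_by all_goals (split <;> omega)

def draw_circle_midpoint (x_center : Int) (y_center : Int) (radius : Int) : List Int × List Int :=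
  pvLoopA x_center y_center radius 0 (1 - radius)

-- ===== PORT B =====
-- B phase 1: collect the octant arc (x, y) pairs only.
def pvArc (x y p : Int) : List (Int × Int) :=
  if x ≥ y then
    let y' := y + 1
    let x' := if p ≤ 0 then x else x - 1
    let p' := if p ≤ 0 then p + 2 * y' + 1 else p + 2 * y' - 2 * (x - 1) + 1
    (x, y) :: pvArc x' y' p'
  else []
termination_by (x - y + 1).toNat
decreasing_by all_goals (split <;> omega)

def pvTransforms : List (Int × Int × Bool) :=
  [(1, 1, false), (1, 1, true), (-1, 1, false), (-1, 1, true),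
   (-1, -1, false), (-1, -1, true), (1, -1, false), (1, -1, true)]

-- B phase 2: per arc point, emit the 8 reflections driven by the transform table.
def pvEmit (xc yc : Int) (acc : List Int × List Int) (pt : Int × Int) : List Int × List Int :=
  pvTransforms.foldl
    (fun acc t =>
      let ab := if t.2.2 then (pt.2, pt.1) else (pt.1, pt.2)
      (acc.1 ++ [t.1 * ab.1 + xc], acc.2 ++ [t.2.1 * ab.2 + yc])) acc

def draw_circle_midpoint_alt (x_center : Int) (y_center : Int) (radius : Int) : List Int × List Int :=
  (pvArc radius 0 (1 - radius)).foldl (pvEmit x_center y_center) ([], [])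

-- ===== PRECONDITION & SPEC =====
def Spec_draw_circle_midpoint (x_center : Int) (y_center : Int) (radius : Int) (out : List Int × List Int) : Prop := out = draw_circle_midpoint_alt x_center y_center radius
instance (x_center : Int) (y_center : Int) (radius : Int) (out : List Int × List Int) : Decidable (Spec_draw_circle_midpoint x_center y_center radius out) := by unfold Spec_draw_circle_midpoint; infer_instance

-- ===== CLAIM (what is proved, stated in full; the proofs are below) =====
def Claim_equal_draw_circle_midpoint : Prop := ∀ (x_center : Int) (y_center : Int) (radius : Int), Dom_draw_circle_midpoint x_center y_center radius → Spec_draw_circle_midpoint x_center y_center radius (draw_circle_midpoint x_center y_center radius)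

-- ===== LEMMAS AND PROOFS =====
lemma pvEmit_acc (xc yc : Int) (acc : List Int × List Int) (pt : Int × Int) :
    pvEmit xc yc acc pt =
      (acc.1 ++ (pvEmit xc yc ([], []) pt).1, acc.2 ++ (pvEmit xc yc ([], []) pt).2) := by
  simp [pvEmit, pvTransforms, List.foldl]

lemma foldl_pvEmit_acc (xc yc : Int) (l : List (Int × Int)) (acc : List Int × List Int) :
    l.foldl (pvEmit xc yc) acc =
      (acc.1 ++ (l.foldl (pvEmit xc yc) ([], [])).1,
       acc.2 ++ (l.foldl (pvEmit xc yc) ([], [])).2) := by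
  induction l generalizing acc with
  | nil => simp [List.foldl]
  | cons pt rest ih =>
      simp only [List.foldl]
      rw [ih (pvEmit xc yc acc pt), ih (pvEmit xc yc ([], []) pt)]
      rw [pvEmit_acc]
      simp [List.append_assoc]

lemma pvLoopA_eq_arc_emit (xc yc : Int) : ∀ x y p : Int,
    pvLoopA xc yc x y p = (pvArc x y p).foldl (pvEmit xc yc) ([], []) := by
  intro x y p
  induction x, y, p using pvArc.induct with
  | case1 x y p hge y' x' p' ih =>
      rw [pvLoopA, pvArc]
      simp only [if_pos hge, List.foldl]
      rw [foldl_pvEmit_acc]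
      simp only [x', y', p', dite_eq_ite] at ih
      rw [← ih]
      simp [pvEmit, pvTransforms, List.foldl]
  | case2 x y p hlt =>
      rw [pvLoopA, pvArc]
      simp [if_neg hlt]

-- ===== VERDICT (by name: the statement is the Claim_ definition above) =====
theorem draw_circle_midpoint_spec : Claim_equal_draw_circle_midpoint := by
  intro xc yc r _
  unfold Spec_draw_circle_midpoint draw_circle_midpoint draw_circle_midpoint_alt
  exact pvLoopA_eq_arc_emit xc yc r 0 (1 - r)
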